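-- pv_equiv track=rewrite | github.com/seminss/algorithm-study | khw3754/Dynamic Programming/[PGS] 땅따먹기#.py | solution
-- ===== SOURCE A (Python) =====
-- def solution(land):
--     for i in range(1, len(land)):
--         for j in range(4):
--             targets = []
--             targets.extend(land[i - 1][:j])
--             targets.extend(land[i - 1][j + 1:])
--             land[i][j] += max(targets)
--
--     return max(land[-1])
-- ===== SOURCE B (Python) =====
-- def solution(land):
--     for i in range(1, len(land)):
--         prev = land[i - 1]
--         max1 = max(prev)
--         idx1 = prev.index(max1)
--         max2 = max(prev[:idx1] + prev[idx1 + 1:])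
--         for j in range(4):
--             land[i][j] += max2 if j == idx1 else max1
--     return max(land[-1])
-- ===== Notes on version B (the rewrite author's own statement) =====
-- stated objective: faster
-- what changed: Per row, instead of rebuilding and rescanning the previous row once per column (4 slices + 4 max calls), B scans the previous row once for its max, argmax and second max and adds a cached value per column.
import Mathlib
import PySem

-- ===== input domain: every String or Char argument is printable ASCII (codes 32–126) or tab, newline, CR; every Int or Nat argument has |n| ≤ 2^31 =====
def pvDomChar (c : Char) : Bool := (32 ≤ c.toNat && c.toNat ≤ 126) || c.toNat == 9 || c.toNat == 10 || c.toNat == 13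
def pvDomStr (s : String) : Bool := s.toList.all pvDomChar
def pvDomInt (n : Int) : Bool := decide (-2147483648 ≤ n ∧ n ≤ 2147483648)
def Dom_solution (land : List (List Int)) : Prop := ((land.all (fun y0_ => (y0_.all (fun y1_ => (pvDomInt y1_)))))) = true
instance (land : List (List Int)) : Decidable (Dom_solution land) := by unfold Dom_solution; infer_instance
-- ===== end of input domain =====

-- B replaces A's per-column rebuild-and-rescan of the previous row by one top-two pass per row (faster by a constant factor).
-- Both Pythons mutate `land` in place identically; the claim here is about the return value.

-- max(xs) for a nonempty list; default 0 is only reached outside Pre_solution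
def pvMaxD (xs : List Int) : Int := (PySem.List.max? xs (fun x => x)).getD 0

-- ===== PORT A =====
def solution (land : List (List Int)) : Int :=
  let land2 := (PySem.List.pyRange 1 land.length 1).foldl (fun land i =>
    (PySem.List.pyRange 0 4 1).foldl (fun land j =>
      let prev := PySem.List.pyGetD land (i - 1) []
      let targets := ([] : List Int)
          ++ PySem.List.slice prev none (some j)
          ++ PySem.List.slice prev (some (j + 1)) none
      let row := PySem.List.pyGetD land i []
      PySem.List.pySetD land i
        (PySem.List.pySetD row j (PySem.List.pyGetD row j 0 + pvMaxD targets))) land) land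
  pvMaxD (PySem.List.pyGetD land2 (-1) [])

-- ===== PORT B =====
def solution_alt (land : List (List Int)) : Int :=
  let land2 := (PySem.List.pyRange 1 land.length 1).foldl (fun land i =>
    let prev := PySem.List.pyGetD land (i - 1) []
    let max1 := pvMaxD prev
    let idx1 : Int := (((PySem.List.index? prev max1).getD 0 : Nat) : Int)
    let max2 := pvMaxD (PySem.List.slice prev none (some idx1)
                        ++ PySem.List.slice prev (some (idx1 + 1)) none)
    (PySem.List.pyRange 0 4 1).foldl (fun land j =>
      let row := PySem.List.pyGetD land i []
      PySem.List.pySetD land i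
        (PySem.List.pySetD row j
          (PySem.List.pyGetD row j 0 + (if j = idx1 then max2 else max1)))) land) land
  pvMaxD (PySem.List.pyGetD land2 (-1) [])

-- ===== PRECONDITION & SPEC =====
-- Pre_solution is exactly where Python A returns: a nonempty land whose rows after the first
-- have ≥ 4 columns (for land[i][j] +=) and whose first row has ≥ 2 columns when another row
-- follows (so max(targets) is never over an empty list); a lone row need only be nonempty.
def Pre_solution (land : List (List Int)) : Prop :=
  land ≠ [] ∧ (∀ s ∈ land.tail, 4 ≤ s.length) ∧
    (land.length = 1 → land.headI ≠ []) ∧ (2 ≤ land.length → 2 ≤ land.headI.length)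
instance (land : List (List Int)) : Decidable (Pre_solution land) := by
  unfold Pre_solution; infer_instance
def pvWitness_solution : List (List Int) := [[1, 2, 3, 5], [5, 6, 7, 8]]
def Spec_solution (land : List (List Int)) (out : Int) : Prop := out = solution_alt land
instance (land : List (List Int)) (out : Int) : Decidable (Spec_solution land out) := by
  unfold Spec_solution; infer_instance

-- ===== CLAIM (what is proved, stated in full; the proofs are below) =====
def Claim_equal_solution : Prop := ∀ (land : List (List Int)), Dom_solution land → Pre_solution land → Spec_solution land (solution land)

-- ===== LEMMAS AND PROOFS =====

-- pvMaxD of a nonempty list is a member …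
theorem pvMaxD_mem (xs : List Int) (h : xs ≠ []) : pvMaxD xs ∈ xs := by
  obtain ⟨m, hm⟩ : ∃ m, PySem.List.max? xs (fun x => x) = some m := by
    cases hmx : PySem.List.max? xs (fun x => x) with
    | none => exact absurd ((PySem.List.max?_eq_none_iff _ _).mp hmx) h
    | some m => exact ⟨m, rfl⟩
  simpa [pvMaxD, hm] using PySem.List.max?_mem hm

-- … and an upper bound
theorem pvMaxD_isMax (xs : List Int) (h : xs ≠ []) : ∀ y ∈ xs, y ≤ pvMaxD xs := by
  obtain ⟨m, hm⟩ : ∃ m, PySem.List.max? xs (fun x => x) = some m := by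
    cases hmx : PySem.List.max? xs (fun x => x) with
    | none => exact absurd ((PySem.List.max?_eq_none_iff _ _).mp hmx) h
    | some m => exact ⟨m, rfl⟩
  intro y hy
  simpa [pvMaxD, hm] using PySem.List.max?_isMax hm y hy

-- removing a non-maximum position keeps the maximum
theorem pvMaxD_eq_of_mem_le (t xs : List Int) (hmem : pvMaxD xs ∈ t)
    (hsub : ∀ y ∈ t, y ∈ xs) (hne : xs ≠ []) : pvMaxD t = pvMaxD xs := by
  have ht : t ≠ [] := by intro h; simp [h] at hmem
  have h1 : pvMaxD t ≤ pvMaxD xs := pvMaxD_isMax xs hne _ (hsub _ (pvMaxD_mem t ht))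
  have h2 : pvMaxD xs ≤ pvMaxD t := pvMaxD_isMax t ht _ hmem
  omega

-- the core: A's max over prev-without-column-j equals B's top-two selection, for ANY prev
theorem pv_excl_max (prev : List Int) (j : Int) (hj : 0 ≤ j) :
    pvMaxD (PySem.List.slice prev none (some j)
            ++ PySem.List.slice prev (some (j + 1)) none)
      = (if j = (((PySem.List.index? prev (pvMaxD prev)).getD 0 : Nat) : Int)
         then pvMaxD (PySem.List.slice prev none
                  (some (((PySem.List.index? prev (pvMaxD prev)).getD 0 : Nat) : Int))
                ++ PySem.List.slice prev
                  (some ((((PySem.List.index? prev (pvMaxD prev)).getD 0 : Nat) : Int) + 1)) none)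
         else pvMaxD prev) := by
  set idx1 : Int := (((PySem.List.index? prev (pvMaxD prev)).getD 0 : Nat) : Int) with hidx
  by_cases hcase : j = idx1
  · simp [hcase]
  · simp only [if_neg hcase]
    rcases eq_or_ne prev [] with hnil | hne
    · subst hnil; simp [PySem.List.slice, pvMaxD, PySem.List.max?]
    · -- prev ≠ [] : max1 sits at index k ≠ j.toNat, hence survives in take ++ drop
      have hmem := pvMaxD_mem prev hne
      obtain ⟨k, hk⟩ : ∃ k, PySem.List.index? prev (pvMaxD prev) = some k :=
        Option.isSome_iff_exists.mp ((PySem.List.index?_isSome_iff _ _).mpr hmem)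
      obtain ⟨hklt, hkget, -⟩ := PySem.List.getElem_of_index?_eq_some hk
      have hkidx : idx1 = (k : Int) := by rw [hidx, hk]; rfl
      have hj1 : (0 : Int) ≤ j + 1 := by omega
      rw [PySem.List.slice_to prev hj, PySem.List.slice_from prev hj1]
      have htn : (j + 1).toNat = j.toNat + 1 := by omega
      rw [htn]
      have hkne : k ≠ j.toNat := by
        intro h; apply hcase; rw [hkidx]; omega
      apply pvMaxD_eq_of_mem_le _ _ _ _ hne
      · -- pvMaxD prev ∈ take j.toNat ++ drop (j.toNat+1)
        rcases Nat.lt_or_ge k j.toNat with hlt | hge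
        · apply List.mem_append_left
          rw [← hkget]
          exact List.mem_take_iff_getElem.mpr ⟨k, by omega, by simp⟩
        · apply List.mem_append_right
          have hk1 : j.toNat + 1 ≤ k := by omega
          have hlen : k - (j.toNat + 1) < (prev.drop (j.toNat + 1)).length := by
            simp [List.length_drop]; omega
          rw [← hkget]
          have : (prev.drop (j.toNat + 1))[k - (j.toNat + 1)] = prev[k] := by
            rw [List.getElem_drop]; congr 1; omega
          rw [← this]
          exact List.getElem_mem _
      · intro y hy
        rcases List.mem_append.mp hy with h | h
        · exact List.mem_of_mem_take h
        · exact List.mem_of_mem_drop h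

-- setting row i does not change row i-1 (or anything when i is out of range)
theorem pv_getD_setD_pred (land : List (List Int)) (i : Int) (hi : 1 ≤ i) (v : List Int) :
    PySem.List.pyGetD (PySem.List.pySetD land i v) (i - 1) ([] : List Int)
      = PySem.List.pyGetD land (i - 1) [] := by
  have h0 : (0 : Int) ≤ i := by omega
  have h1 : (0 : Int) ≤ i - 1 := by omega
  rw [PySem.List.pySetD_of_nonneg land v h0]
  have he : i - 1 = (((i - 1).toNat : Nat) : Int) := by omega
  rw [he, PySem.List.pyGetD_natCast, PySem.List.pyGetD_natCast]
  have hne : i.toNat ≠ i.toNat - 1 := by omega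
  simp [List.getD_eq_getElem?_getD, List.getElem?_set_ne hne]

-- the inner column loop of A equals that of B, given B's cached previous row
theorem pv_inner (i : Int) (hi : 1 ≤ i) (prev0 : List Int) (js : List Int)
    (hjs : ∀ j ∈ js, 0 ≤ j) :
    ∀ land : List (List Int), PySem.List.pyGetD land (i - 1) [] = prev0 →
      js.foldl (fun land j =>
        let prev := PySem.List.pyGetD land (i - 1) []
        let targets := ([] : List Int)
            ++ PySem.List.slice prev none (some j)
            ++ PySem.List.slice prev (some (j + 1)) none
        let row := PySem.List.pyGetD land i []
        PySem.List.pySetD land i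
          (PySem.List.pySetD row j (PySem.List.pyGetD row j 0 + pvMaxD targets))) land
      = js.foldl (fun land j =>
        let row := PySem.List.pyGetD land i []
        PySem.List.pySetD land i
          (PySem.List.pySetD row j
            (PySem.List.pyGetD row j 0 +
              (if j = (((PySem.List.index? prev0 (pvMaxD prev0)).getD 0 : Nat) : Int)
               then pvMaxD (PySem.List.slice prev0 none
                        (some (((PySem.List.index? prev0 (pvMaxD prev0)).getD 0 : Nat) : Int))
                      ++ PySem.List.slice prev0
                        (some ((((PySem.List.index? prev0 (pvMaxD prev0)).getD 0 : Nat) : Int) + 1)) none)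
               else pvMaxD prev0)))) land := by
  induction js with
  | nil => intro land _; rfl
  | cons j js ih =>
    intro land hprev
    have hj : (0 : Int) ≤ j := hjs j (List.mem_cons_self)
    simp only [List.foldl_cons]
    have hstep :
        (let prev := PySem.List.pyGetD land (i - 1) []
         let targets := ([] : List Int)
             ++ PySem.List.slice prev none (some j)
             ++ PySem.List.slice prev (some (j + 1)) none
         let row := PySem.List.pyGetD land i []
         PySem.List.pySetD land i
           (PySem.List.pySetD row j (PySem.List.pyGetD row j 0 + pvMaxD targets)))
        = (let row := PySem.List.pyGetD land i []
           PySem.List.pySetD land i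
             (PySem.List.pySetD row j
               (PySem.List.pyGetD row j 0 +
                 (if j = (((PySem.List.index? prev0 (pvMaxD prev0)).getD 0 : Nat) : Int)
                  then pvMaxD (PySem.List.slice prev0 none
                           (some (((PySem.List.index? prev0 (pvMaxD prev0)).getD 0 : Nat) : Int))
                         ++ PySem.List.slice prev0
                           (some ((((PySem.List.index? prev0 (pvMaxD prev0)).getD 0 : Nat) : Int) + 1)) none)
                  else pvMaxD prev0)))) := by
      simp only [hprev, List.nil_append]
      rw [pv_excl_max prev0 j hj]
    rw [hstep]
    exact ih (fun j hj' => hjs j (List.mem_cons_of_mem _ hj')) _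
      (by rw [pv_getD_setD_pred _ _ hi, hprev])

theorem solution_total (land : List (List Int)) : solution land = solution_alt land := by
  unfold solution solution_alt
  refine congrArg (fun l2 => pvMaxD (PySem.List.pyGetD l2 (-1) ([] : List Int))) ?_
  apply PySem.List.foldl_congr_mem
  intro acc i hi
  have h1 : (1 : Int) ≤ i := ((PySem.List.mem_pyRange_one).mp hi).1
  exact pv_inner i h1 (PySem.List.pyGetD acc (i - 1) []) _
    (fun j hj => ((PySem.List.mem_pyRange_one).mp hj).1) acc rfl

-- ===== VERDICT (by name: the statement is the Claim_ definition above) =====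
theorem solution_spec : Claim_equal_solution := by
  intro land _ _
  unfold Spec_solution
  exact solution_total land
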